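-- pv_equiv track=rewrite | github.com/ballsnuga-crypto/bott | economy_cog.py | expand_polybet_glued_urls
-- ===== SOURCE A (Python) =====
-- def expand_polybet_glued_urls(args: tuple[str, ...]) -> tuple[list[str], bool]:
--     """Split `Uphttps://...` into `https://...`; returns (tokens, glued_detected)."""
--     glued = False
--     out: list[str] = []
--     for a in args:
--         al = a.lower()
--         pos = -1
--         for needle in ("https://", "http://"):
--             j = al.find(needle)
--             if j >= 0 and (pos < 0 or j < pos):
--                 pos = j
--         if pos > 0:
--             glued = True
--             out.append(a[pos:])
--         else:
--             out.append(a)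
--     return out, glued
-- ===== SOURCE B (Python) =====
-- def expand_polybet_glued_urls(args):
--     """Split `Uphttps://...` into `https://...`; returns (tokens, glued_detected).
--
--     Different strategy: instead of searching for whole scheme needles, anchor on the
--     separator '://' and validate backwards whether 'http' or 'https' immediately
--     precedes it; the earliest validated separator marks the scheme start. Correct
--     because each scheme occurrence contains exactly one '://' at offset 4/5, a given
--     separator can be preceded by at most one of the two scheme names, and separator
--     order matches scheme-start order."""
--     out = []
--     glued = False
--     for a in args:
--         al = a.lower()
--         pos = -1
--         for k in range(len(al)):
--             if al.startswith("://", k):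
--                 if k >= 4 and al[k - 4:k] == "http":
--                     pos = k - 4
--                     break
--                 if k >= 5 and al[k - 5:k] == "https":
--                     pos = k - 5
--                     break
--         if pos > 0:
--             glued = True
--             out.append(a[pos:])
--         else:
--             out.append(a)
--     return out, glued
-- ===== Notes on version B (the rewrite author's own statement) =====
-- stated objective: alternative
-- what changed: Instead of searching for the two whole scheme needles and taking the min of the find positions, B anchors on the separator '://' and validates backwards whether 'http' or 'https' immediately precedes the earliest validated separator.
import Mathlib
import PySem

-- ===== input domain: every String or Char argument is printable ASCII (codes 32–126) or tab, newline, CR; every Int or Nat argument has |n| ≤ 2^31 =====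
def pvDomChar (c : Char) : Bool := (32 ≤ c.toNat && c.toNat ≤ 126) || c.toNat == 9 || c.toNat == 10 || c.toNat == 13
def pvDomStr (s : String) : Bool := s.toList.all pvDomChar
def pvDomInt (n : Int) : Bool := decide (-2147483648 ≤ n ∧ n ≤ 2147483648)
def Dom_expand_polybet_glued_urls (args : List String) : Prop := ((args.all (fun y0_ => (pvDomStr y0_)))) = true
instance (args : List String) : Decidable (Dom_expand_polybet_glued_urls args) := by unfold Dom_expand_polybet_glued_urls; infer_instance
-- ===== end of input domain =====

-- B replaces A's two-needle find-then-min search by an anchor-on-'://'-and-validate-backwards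
-- scan (objective: alternative, same cost).

-- ===== PORT A =====
def expand_polybet_glued_urls (args : List String) : List String × Bool :=
  args.foldl
    (fun acc a =>
      let al := PySem.Str.lower a
      let pos : Int :=
        (["https://", "http://"] : List String).foldl
          (fun pos needle =>
            let j := PySem.Str.find al needle
            if 0 ≤ j ∧ (pos < 0 ∨ j < pos) then j else pos)
          (-1)
      if 0 < pos then (acc.1 ++ [PySem.Str.slice a (some pos) none], true)
      else (acc.1 ++ [a], acc.2))
    ([], false)

-- ===== PORT B =====
-- Source B's inner `for k in range(len(al))` loop, transcribed as recursion on the index k.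
-- `al.startswith("://", k)` with 0 ≤ k ≤ len is exactly `"://".toList <+: al.drop k`;
-- `al[k-4:k] == "http"` with 4 ≤ k ≤ len is exactly `(al.drop (k-4)).take 4 = "http".toList`
-- (slice with non-negative in-range bounds), and analogously for the https check.
def urlPosColon (al : List Char) (k : Nat) : Int :=
  if _h : k < al.length then
    if "://".toList <+: al.drop k then
      if 4 ≤ k ∧ (al.drop (k - 4)).take 4 = "http".toList then (k : Int) - 4
      else if 5 ≤ k ∧ (al.drop (k - 5)).take 5 = "https".toList then (k : Int) - 5
      else urlPosColon al (k + 1)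
    else urlPosColon al (k + 1)
  else -1
termination_by al.length - k

def expand_polybet_glued_urls_alt (args : List String) : List String × Bool :=
  args.foldl
    (fun acc a =>
      let pos := urlPosColon (PySem.Str.lower a).toList 0
      if 0 < pos then (acc.1 ++ [PySem.Str.slice a (some pos) none], true)
      else (acc.1 ++ [a], acc.2))
    ([], false)

-- ===== PRECONDITION & SPEC =====
def Spec_expand_polybet_glued_urls (args : List String) (out : List String × Bool) : Prop := out = expand_polybet_glued_urls_alt args
instance (args : List String) (out : List String × Bool) : Decidable (Spec_expand_polybet_glued_urls args out) := by unfold Spec_expand_polybet_glued_urls; infer_instance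

-- ===== CLAIM (what is proved, stated in full; the proofs are below) =====
def Claim_equal_expand_polybet_glued_urls : Prop := ∀ (args : List String), Dom_expand_polybet_glued_urls args → Spec_expand_polybet_glued_urls args (expand_polybet_glued_urls args)

-- ===== LEMMAS AND PROOFS =====

-- UrlAt al i: one of the two schemes occurs at position i of al.
def UrlAt (al : List Char) (i : Nat) : Prop :=
  "http://".toList <+: al.drop i ∨ "https://".toList <+: al.drop i

-- r is "the first position with UrlAt, or -1 if none".
def IsFirstUrl (al : List Char) (r : Int) : Prop :=
  (r = -1 ∧ ∀ i : Nat, ¬ UrlAt al i) ∨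
  (0 ≤ r ∧ UrlAt al r.toNat ∧ ∀ i : Nat, i < r.toNat → ¬ UrlAt al i)

theorem isFirstUrl_unique (al : List Char) (r s : Int)
    (hr : IsFirstUrl al r) (hs : IsFirstUrl al s) : r = s := by
  rcases hr with ⟨hr1, hr2⟩ | ⟨hr0, hrP, hrmin⟩ <;>
    rcases hs with ⟨hs1, hs2⟩ | ⟨hs0, hsP, hsmin⟩
  · omega
  · exact absurd hsP (hr2 _)
  · exact absurd hrP (hs2 _)
  · rcases Nat.lt_trichotomy r.toNat s.toNat with h | h | h
    · exact absurd hrP (hsmin _ h)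
    · omega
    · exact absurd hsP (hrmin _ h)

-- a valid separator position (as checked by Source B's inner loop)
def ValidColon (al : List Char) (k : Nat) : Prop :=
  "://".toList <+: al.drop k ∧
    ((4 ≤ k ∧ (al.drop (k - 4)).take 4 = "http".toList) ∨
     (5 ≤ k ∧ (al.drop (k - 5)).take 5 = "https".toList))

theorem prefix_split (xs p q : List Char) (n : Nat) (hp : p.length = n) :
    (p ++ q) <+: xs ↔ xs.take n = p ∧ q <+: xs.drop n := by
  subst hp
  constructor
  · rintro ⟨t, rfl⟩
    refine ⟨?_, ⟨t, ?_⟩⟩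
    · rw [List.append_assoc, List.take_left]
    · rw [List.append_assoc, List.drop_left]
  · rintro ⟨h1, t, h2⟩
    exact ⟨t, by rw [← h1, List.append_assoc, h2, List.take_append_drop]⟩

theorem http_to_colon (al : List Char) (i : Nat)
    (h : "http://".toList <+: al.drop i) : ValidColon al (i + 4) := by
  have h' := (prefix_split (al.drop i) "http".toList "://".toList 4 (by decide)).mp
    (by simpa using h)
  rw [List.drop_drop] at h'
  exact ⟨by simpa [Nat.add_comm] using h'.2,
    Or.inl ⟨by omega, by simpa [show i + 4 - 4 = i by omega] using h'.1⟩⟩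

theorem https_take5 (al : List Char) (i : Nat)
    (h : "https://".toList <+: al.drop i) : (al.drop i).take 5 = "https".toList :=
  ((prefix_split (al.drop i) "https".toList "://".toList 5 (by decide)).mp
    (by simpa using h)).1

theorem https_to_colon (al : List Char) (i : Nat)
    (h : "https://".toList <+: al.drop i) : ValidColon al (i + 5) := by
  have h' := (prefix_split (al.drop i) "https".toList "://".toList 5 (by decide)).mp
    (by simpa using h)
  rw [List.drop_drop] at h'
  exact ⟨by simpa [Nat.add_comm] using h'.2,
    Or.inr ⟨by omega, by simpa [show i + 5 - 5 = i by omega] using h'.1⟩⟩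

theorem colon_to_scheme_http (al : List Char) (k : Nat)
    (hc : "://".toList <+: al.drop k) (h4 : 4 ≤ k)
    (hb : (al.drop (k - 4)).take 4 = "http".toList) :
    "http://".toList <+: al.drop (k - 4) := by
  have : ("http".toList ++ "://".toList) <+: al.drop (k - 4) := by
    rw [prefix_split (al.drop (k - 4)) "http".toList "://".toList 4 (by decide),
      List.drop_drop, show k - 4 + 4 = k by omega]
    exact ⟨hb, hc⟩
  simpa using this

theorem colon_to_scheme_https (al : List Char) (k : Nat)
    (hc : "://".toList <+: al.drop k) (h5 : 5 ≤ k)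
    (hb : (al.drop (k - 5)).take 5 = "https".toList) :
    "https://".toList <+: al.drop (k - 5) := by
  have : ("https".toList ++ "://".toList) <+: al.drop (k - 5) := by
    rw [prefix_split (al.drop (k - 5)) "https".toList "://".toList 5 (by decide),
      List.drop_drop, show k - 5 + 5 = k by omega]
    exact ⟨hb, hc⟩
  simpa using this

theorem https_back4 (al : List Char) (k : Nat) (h5 : 5 ≤ k)
    (hb : (al.drop (k - 5)).take 5 = "https".toList) :
    (al.drop (k - 4)).take 4 = "ttps".toList := by
  have hd : al.drop (k - 4) = (al.drop (k - 5)).drop 1 := by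
    rw [List.drop_drop]; congr 1; omega
  rw [hd, show (4 : Nat) = 5 - 1 from rfl, ← List.drop_take, hb]
  decide

theorem validColon_lt (al : List Char) (k : Nat) (h : ValidColon al k) : k < al.length := by
  have := h.1.length_le
  simp [List.length_drop] at this
  omega

theorem scan_spec (al : List Char) (k : Nat)
    (hyp : ∀ j, j < k → ¬ ValidColon al j) : IsFirstUrl al (urlPosColon al k) := by
  generalize hm : al.length - k = m
  induction m using Nat.strong_induction_on generalizing k with
  | _ m ih =>
    rw [urlPosColon]
    by_cases hk : k < al.length
    · rw [dif_pos hk]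
      by_cases hsep : "://".toList <+: al.drop k
      · rw [if_pos hsep]
        by_cases h1 : 4 ≤ k ∧ (al.drop (k - 4)).take 4 = "http".toList
        · rw [if_pos h1]
          obtain ⟨h4, hb⟩ := h1
          right
          have hto : ((k : Int) - 4).toNat = k - 4 := by omega
          refine ⟨by omega, ?_, ?_⟩
          · rw [hto]; exact Or.inl (colon_to_scheme_http al k hsep h4 hb)
          · rw [hto]
            intro i hi hscheme
            rcases hscheme with hhttp | hhttps
            · exact hyp _ (by omega) (http_to_colon al i hhttp)
            · by_cases hik : i + 5 < k
              · exact hyp _ hik (https_to_colon al i hhttps)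
              · have hik' : k - 5 = i := by omega
                have h5 : 5 ≤ k := by omega
                have := https_back4 al k h5 (by rw [hik']; exact https_take5 al i hhttps)
                rw [hb] at this
                exact absurd this (by decide)
        · rw [if_neg h1]
          by_cases h2 : 5 ≤ k ∧ (al.drop (k - 5)).take 5 = "https".toList
          · rw [if_pos h2]
            obtain ⟨h5, hb⟩ := h2
            right
            have hto : ((k : Int) - 5).toNat = k - 5 := by omega
            refine ⟨by omega, ?_, ?_⟩
            · rw [hto]; exact Or.inr (colon_to_scheme_https al k hsep h5 hb)
            · rw [hto]
              intro i hi hscheme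
              rcases hscheme with hhttp | hhttps
              · exact hyp _ (by omega) (http_to_colon al i hhttp)
              · exact hyp _ (by omega) (https_to_colon al i hhttps)
          · rw [if_neg h2]
            refine ih (al.length - (k + 1)) (by omega) (k + 1) ?_ rfl
            intro j hj
            rcases Nat.lt_or_ge j k with hjk | hjk
            · exact hyp j hjk
            · have hjk' : j = k := by omega
              subst hjk'
              intro hv
              rcases hv.2 with h | h
              · exact h1 h
              · exact h2 h
      · rw [if_neg hsep]
        refine ih (al.length - (k + 1)) (by omega) (k + 1) ?_ rfl
        intro j hj
        rcases Nat.lt_or_ge j k with hjk | hjk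
        · exact hyp j hjk
        · have hjk' : j = k := by omega
          subst hjk'
          exact fun hv => hsep hv.1
    · rw [dif_neg hk]
      left
      refine ⟨rfl, fun i hi => ?_⟩
      rcases hi with hhttp | hhttps
      · have h := http_to_colon al i hhttp
        exact hyp _ (by have := validColon_lt al _ h; omega) h
      · have h := https_to_colon al i hhttps
        exact hyp _ (by have := validColon_lt al _ h; omega) h

-- A's min-of-two-finds computes the same first position.
theorem isFirstUrl_posA (al : List Char)
    (j1 j2 : Int)
    (hj1 : j1 = PySem.Chars.find al "https://".toList)
    (hj2 : j2 = PySem.Chars.find al "http://".toList) :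
    IsFirstUrl al
      (if 0 ≤ j2 ∧ ((if 0 ≤ j1 ∧ ((-1 : Int) < 0 ∨ j1 < -1) then j1 else -1) < 0 ∨
            j2 < (if 0 ≤ j1 ∧ ((-1 : Int) < 0 ∨ j1 < -1) then j1 else -1))
        then j2 else (if 0 ≤ j1 ∧ ((-1 : Int) < 0 ∨ j1 < -1) then j1 else -1)) := by
  have hge1 : -1 ≤ j1 := hj1 ▸ PySem.Chars.neg_one_le_find al _
  have hge2 : -1 ≤ j2 := hj2 ▸ PySem.Chars.neg_one_le_find al _
  have habs1 : j1 = -1 → ∀ i : Nat, ¬ "https://".toList <+: al.drop i := by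
    intro h i hp
    have hin : PySem.Chars.isIn "https://".toList al = true :=
      (PySem.Chars.exists_prefix_drop_iff_isIn "https://".toList al).mp ⟨i, hp⟩
    have := (PySem.Chars.find_ne_neg_one_iff al "https://".toList).mpr
      ((PySem.Chars.isIn_iff_infix "https://".toList al).mp hin)
    omega
  have habs2 : j2 = -1 → ∀ i : Nat, ¬ "http://".toList <+: al.drop i := by
    intro h i hp
    have hin : PySem.Chars.isIn "http://".toList al = true :=
      (PySem.Chars.exists_prefix_drop_iff_isIn "http://".toList al).mp ⟨i, hp⟩
    have := (PySem.Chars.find_ne_neg_one_iff al "http://".toList).mpr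
      ((PySem.Chars.isIn_iff_infix "http://".toList al).mp hin)
    omega
  have hspec1 : 0 ≤ j1 → "https://".toList <+: al.drop j1.toNat ∧
      ∀ i < j1.toNat, ¬ "https://".toList <+: al.drop i := by
    intro h; exact hj1 ▸ PySem.Chars.find_spec (by omega)
  have hspec2 : 0 ≤ j2 → "http://".toList <+: al.drop j2.toNat ∧
      ∀ i < j2.toNat, ¬ "http://".toList <+: al.drop i := by
    intro h; exact hj2 ▸ PySem.Chars.find_spec (by omega)
  by_cases h1 : 0 ≤ j1 <;> by_cases h2 : 0 ≤ j2
  · -- both found: result is min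
    rcases hspec1 h1 with ⟨hp1, hm1⟩
    rcases hspec2 h2 with ⟨hp2, hm2⟩
    by_cases hlt : j2 < j1
    · rw [if_pos ⟨h2, by rw [if_pos (⟨h1, Or.inl (by omega)⟩ : 0 ≤ j1 ∧ ((-1:Int) < 0 ∨ j1 < -1))]; omega⟩]
      right
      exact ⟨h2, Or.inl hp2, fun i hi => by
        intro h
        rcases h with h | h
        · exact hm2 i hi h
        · exact hm1 i (by omega) h⟩
    · rw [if_neg (by rw [if_pos (⟨h1, Or.inl (by omega)⟩ : 0 ≤ j1 ∧ ((-1:Int) < 0 ∨ j1 < -1))]; omega),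
        if_pos (⟨h1, Or.inl (by omega)⟩ : 0 ≤ j1 ∧ ((-1:Int) < 0 ∨ j1 < -1))]
      right
      exact ⟨h1, Or.inr hp1, fun i hi => by
        intro h
        rcases h with h | h
        · exact hm2 i (by omega) h
        · exact hm1 i hi h⟩
  · -- only https found
    have he2 : j2 = -1 := by omega
    rw [if_neg (by omega), if_pos (⟨h1, Or.inl (by omega)⟩ : 0 ≤ j1 ∧ ((-1:Int) < 0 ∨ j1 < -1))]
    rcases hspec1 h1 with ⟨hp1, hm1⟩
    right
    exact ⟨h1, Or.inr hp1, fun i hi => by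
      intro h
      rcases h with h | h
      · exact habs2 he2 i h
      · exact hm1 i hi h⟩
  · -- only http found
    have he1 : j1 = -1 := by omega
    rw [if_pos ⟨h2, Or.inl (by rw [if_neg (by omega)]; omega)⟩]
    rcases hspec2 h2 with ⟨hp2, hm2⟩
    right
    exact ⟨h2, Or.inl hp2, fun i hi => by
      intro h
      rcases h with h | h
      · exact hm2 i hi h
      · exact habs1 he1 i h⟩
  · -- neither found
    have he1 : j1 = -1 := by omega
    have he2 : j2 = -1 := by omega
    rw [if_neg (by omega), if_neg (by omega)]
    left
    exact ⟨rfl, fun i h => by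
      rcases h with h | h
      · exact habs2 he2 i h
      · exact habs1 he1 i h⟩

theorem pos_eq (al : String) :
    (["https://", "http://"] : List String).foldl
      (fun pos needle =>
        let j := PySem.Str.find al needle
        if 0 ≤ j ∧ (pos < 0 ∨ j < pos) then j else pos)
      (-1) = urlPosColon al.toList 0 := by
  apply isFirstUrl_unique al.toList
  · simp only [List.foldl]
    exact isFirstUrl_posA al.toList _ _ (by simp [PySem.Str.find_eq]) (by simp [PySem.Str.find_eq])
  · exact scan_spec al.toList 0 (fun j hj => absurd hj (Nat.not_lt_zero j))

-- ===== VERDICT (by name: the statement is the Claim_ definition above) =====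
theorem expand_polybet_glued_urls_spec : Claim_equal_expand_polybet_glued_urls := by
  intro args _
  show expand_polybet_glued_urls args = expand_polybet_glued_urls_alt args
  unfold expand_polybet_glued_urls expand_polybet_glued_urls_alt
  congr 1
  funext acc a
  simp only [pos_eq (PySem.Str.lower a)]
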